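-- pv_equiv track=rewrite | github.com/aligerami/assignment1 | chapter6-29.py | sum_of_double_even_place_number
-- ===== SOURCE A (Python) =====
-- def sum_of_double_even_place_number(number):
--     sum=0
--     counter=0
--     number_as_string=str(number)
--     if(len(number_as_string)%2==0):
--         counter=counter+1
--     for i in number_as_string:
--         counter=counter+1
--         if(counter%2==0):
--             sum=get_digit_number(int(i)*2)+sum
--     return sum
--
-- def get_digit_number(number):
--     if(number<10):
--         return number
--     sum=0
--     for i in range (0,len(str(number))):
--         sum=sum+number%10
--         number=number//10
--     return sum
-- ===== SOURCE B (Python) =====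
-- def sum_of_double_even_place_number(number):
--     s = str(number)
--     i = 0 if len(s) % 2 == 0 else 1
--     total = 0
--     while i < len(s):
--         t = 2 * int(s[i])
--         total += t if t < 10 else t - 9
--         i += 2
--     return total
-- ===== Notes on version B (the rewrite author's own statement) =====
-- stated objective: simpler
-- what changed: B drops A's running counter/parity branch and the get_digit_number digit-summing helper loop: it starts at a parity-determined index, steps two at a time, and maps each doubled digit by the closed Luhn form (subtract nine when the double has two digits).
import Mathlib
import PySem

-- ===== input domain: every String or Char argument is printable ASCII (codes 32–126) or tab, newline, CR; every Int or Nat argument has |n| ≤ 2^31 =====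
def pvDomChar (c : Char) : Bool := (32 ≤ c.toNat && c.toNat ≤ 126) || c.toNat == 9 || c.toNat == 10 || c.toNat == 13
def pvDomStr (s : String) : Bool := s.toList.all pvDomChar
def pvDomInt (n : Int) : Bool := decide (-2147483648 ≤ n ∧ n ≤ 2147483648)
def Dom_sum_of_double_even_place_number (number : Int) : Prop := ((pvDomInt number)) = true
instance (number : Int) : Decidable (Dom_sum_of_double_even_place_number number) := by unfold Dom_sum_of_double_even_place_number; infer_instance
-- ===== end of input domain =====

-- B replaces A's running counter/parity branch and digit-summing helper loop by a
-- parity-determined start index, an index loop stepping two at a time, and the closed Luhn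
-- form for a doubled digit (subtract nine when the double has two digits) (objective: simpler).

-- ===== PORT A =====
def get_digit_number (number : Int) : Int :=
  if number < 10 then number
  else
    ((PySem.List.pyRange 0 (((PySem.Int.toStr number).toList.length : Int)) 1).foldl
      (fun (st : Int × Int) _ => (st.1 + PySem.Int.mod st.2 10, PySem.Int.floordiv st.2 10))
      (0, number)).1

def sum_of_double_even_place_number (number : Int) : Int :=
  let number_as_string := (PySem.Int.toStr number).toList
  let counter0 : Int := if ((number_as_string.length : Int)) % 2 = 0 then 0 + 1 else 0
  (number_as_string.foldl
    (fun (p : Int × Int) i =>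
      let counter := p.2 + 1
      if counter % 2 = 0 then
        (get_digit_number ((PySem.Int.ofStr? (String.mk [i])).getD 0 * 2) + p.1, counter)
      else (p.1, counter))
    (0, counter0)).1

-- ===== PORT B =====
def pvLoopB (s : List Char) (total : Int) (i : Int) : Int :=
  if h : i < (s.length : Int) then
    let t := 2 * ((PySem.Int.ofStr? (String.mk [((PySem.List.pyGet? s i).getD ' ')])).getD 0)
    pvLoopB s (total + (if t < 10 then t else t - 9)) (i + 2)
  else total
termination_by ((s.length : Int) - i).toNat
decreasing_by omega

def sum_of_double_even_place_number_alt (number : Int) : Int :=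
  let s := (PySem.Int.toStr number).toList
  pvLoopB s 0 (if ((s.length : Int)) % 2 = 0 then 0 else 1)

-- ===== PRECONDITION & SPEC =====
-- Pre_ excludes exactly the inputs on which A raises ValueError: negative numbers whose
-- decimal string has even length, where int('-') is reached (B raises there too).
def Pre_sum_of_double_even_place_number (number : Int) : Prop :=
  0 ≤ number ∨ (PySem.Int.toStr number).toList.length % 2 = 1
instance (number : Int) : Decidable (Pre_sum_of_double_even_place_number number) := by
  unfold Pre_sum_of_double_even_place_number; infer_instance
def pvWitness_sum_of_double_even_place_number : Int := 4387

def Spec_sum_of_double_even_place_number (number : Int) (out : Int) : Prop := out = sum_of_double_even_place_number_alt number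
instance (number : Int) (out : Int) : Decidable (Spec_sum_of_double_even_place_number number out) := by unfold Spec_sum_of_double_even_place_number; infer_instance

-- ===== CLAIM (what is proved, stated in full; the proofs are below) =====
def Claim_equal_sum_of_double_even_place_number : Prop := ∀ (number : Int), Dom_sum_of_double_even_place_number number → Pre_sum_of_double_even_place_number number → Spec_sum_of_double_even_place_number number (sum_of_double_even_place_number number)

-- ===== LEMMAS AND PROOFS =====

def pvIntOf (c : Char) : Int := (PySem.Int.ofStr? (String.mk [c])).getD 0
def pvPerA (c : Char) : Int := get_digit_number (pvIntOf c * 2)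
def pvPerB (c : Char) : Int := if 2 * pvIntOf c < 10 then 2 * pvIntOf c else 2 * pvIntOf c - 9

def pvStride2 {α : Type} : List α → List α
  | [] => []
  | [a] => [a]
  | a :: _ :: t => a :: pvStride2 t

def pvSumA (l : List Char) : Int := (l.map pvPerA).sum
def pvSumB (l : List Char) : Int := (l.map pvPerB).sum

def pvSel : List Char → Int → Int
  | [], _ => 0
  | c :: cs, cnt => (if (cnt + 1) % 2 = 0 then pvPerA c else 0) + pvSel cs (cnt + 1)

def pvDigits : List Char := ['0','1','2','3','4','5','6','7','8','9']

theorem pvStride2_cons {α : Type} (a : α) (t : List α) :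
    pvStride2 (a :: t) = a :: pvStride2 (t.drop 1) := by
  cases t <;> simp [pvStride2]

theorem pv_mem_stride2 {α : Type} {c : α} : ∀ {l : List α}, c ∈ pvStride2 l → c ∈ l := by
  intro l
  induction l using pvStride2.induct with
  | case1 => simp [pvStride2]
  | case2 a => simp [pvStride2]
  | case3 a b t ih =>
    simp only [pvStride2, List.mem_cons]
    rintro (rfl | h)
    · exact Or.inl rfl
    · exact Or.inr (Or.inr (ih h))

theorem pv_foldA (cs : List Char) : ∀ (s cnt : Int),
    ((cs.foldl
      (fun (p : Int × Int) i =>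
        let counter := p.2 + 1
        if counter % 2 = 0 then
          (get_digit_number ((PySem.Int.ofStr? (String.mk [i])).getD 0 * 2) + p.1, counter)
        else (p.1, counter))
      (s, cnt)).1) = s + pvSel cs cnt := by
  induction cs with
  | nil => intro s cnt; simp [pvSel]
  | cons c cs ih =>
    intro s cnt
    simp only [List.foldl_cons, pvSel]
    by_cases h : (cnt + 1) % 2 = 0
    · simp only [h, if_true, ih]
      show get_digit_number (pvIntOf c * 2) + s + pvSel cs (cnt + 1) = _
      show pvPerA c + s + pvSel cs (cnt + 1) = _
      ring
    · simp only [h, if_false, ih]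
      ring

theorem pv_sel_eq (cs : List Char) : ∀ (cnt : Int),
    pvSel cs cnt = if (cnt + 1) % 2 = 0 then pvSumA (pvStride2 cs) else pvSumA (pvStride2 (cs.drop 1)) := by
  induction cs with
  | nil => intro cnt; simp [pvSel, pvStride2, pvSumA]
  | cons c cs ih =>
    intro cnt
    by_cases h : (cnt + 1) % 2 = 0
    · have h2 : ¬ (cnt + 1 + 1) % 2 = 0 := by omega
      simp only [pvSel, h, if_true, ih, h2, if_false, pvStride2_cons]
      simp [pvSumA]
    · have h2 : (cnt + 1 + 1) % 2 = 0 := by omega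
      simp only [pvSel, h, if_false, ih, h2, if_true]
      simp

theorem pv_loopB_aux (s : List Char) : ∀ (n : Nat) (total i : Int), 0 ≤ i → (s.length : Int) - i ≤ (n : Int) →
    pvLoopB s total i = total + pvSumB (pvStride2 (s.drop i.toNat)) := by
  intro n
  induction n with
  | zero =>
    intro total i hi hle
    have h : ¬ i < (s.length : Int) := by omega
    rw [pvLoopB]
    simp only [h]
    have hk : s.length ≤ i.toNat := by omega
    simp [List.drop_eq_nil_of_le hk, pvStride2, pvSumB]
  | succ n ih =>
    intro total i hi hle
    rw [pvLoopB]
    by_cases h : i < (s.length : Int)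
    · simp only [h, dif_pos]
      have hk : i.toNat < s.length := by omega
      have hget : PySem.List.pyGet? s i = some s[i.toNat] := by
        have h1 := PySem.List.pyGet?_natCast (xs := s) (n := i.toNat)
        rw [Int.toNat_of_nonneg hi] at h1
        rw [h1, List.getElem?_eq_getElem hk]
      show pvLoopB s (total + _) (i + 2) = _
      rw [hget]
      simp only [Option.getD_some]
      set c := s[i.toNat] with hc
      set v : Int := (PySem.Int.ofStr? (String.mk [c])).getD 0 with hv
      rw [ih (total + (if 2 * v < 10 then 2 * v else 2 * v - 9)) (i + 2) (by omega) (by omega)]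
      have h2 : (i + 2).toNat = i.toNat + 2 := by omega
      have hd : s.drop i.toNat = c :: s.drop (i.toNat + 1) := List.drop_eq_getElem_cons hk
      rw [h2, hd, pvStride2_cons]
      simp only [List.drop_drop]
      have h3 : i.toNat + 1 + 1 = i.toNat + 2 := by omega
      rw [h3]
      simp only [pvSumB, List.map_cons, List.sum_cons, pvPerB, pvIntOf, ← hv]
      ring
    · simp only [h]
      have hk : s.length ≤ i.toNat := by omega
      simp [List.drop_eq_nil_of_le hk, pvStride2, pvSumB]

theorem pv_loopB (s : List Char) (total i : Int) (hi : 0 ≤ i) :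
    pvLoopB s total i = total + pvSumB (pvStride2 (s.drop i.toNat)) :=
  pv_loopB_aux s s.length total i hi (by omega)

theorem pv_digits_core : ∀ (f n : Nat) (acc : List Char),
    (∀ c ∈ acc, c ∈ pvDigits) → ∀ c ∈ Nat.toDigitsCore 10 f n acc, c ∈ pvDigits := by
  intro f
  induction f with
  | zero => intro n acc hacc; simpa [Nat.toDigitsCore] using hacc
  | succ f ih =>
    intro n acc hacc c
    have hd : (n % 10).digitChar ∈ pvDigits := by
      have h10 : n % 10 < 10 := Nat.mod_lt _ (by norm_num)
      interval_cases h : (n % 10) <;> decide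
    simp only [Nat.toDigitsCore]
    by_cases hz : n / 10 = 0
    · simp only [hz, if_true]
      intro hm
      rcases List.mem_cons.mp hm with rfl | hm
      · exact hd
      · exact hacc _ hm
    · simp only [hz, if_false]
      refine ih (n / 10) _ ?_ c
      intro d hdm
      rcases List.mem_cons.mp hdm with rfl | hdm
      · exact hd
      · exact hacc _ hdm

theorem pv_digits_toDigits (m : Nat) : ∀ c ∈ Nat.toDigits 10 m, c ∈ pvDigits := by
  exact pv_digits_core (m + 1) m [] (by simp)

theorem pv_perAB {c : Char} (h : c ∈ pvDigits) : pvPerA c = pvPerB c := by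
  fin_cases h <;> decide

theorem pv_sumAB {l : List Char} (h : ∀ c ∈ l, c ∈ pvDigits) : pvSumA l = pvSumB l := by
  unfold pvSumA pvSumB
  induction l with
  | nil => rfl
  | cons c cs ih =>
    simp only [List.map_cons, List.sum_cons]
    rw [pv_perAB (h c List.mem_cons_self), ih (fun d hd => h d (List.mem_cons_of_mem _ hd))]

-- ===== VERDICT (by name: the statement is the Claim_ definition above) =====
theorem pv_toList_toStr_nonneg (n : Int) (h : 0 ≤ n) :
    (PySem.Int.toStr n).toList = Nat.toDigits 10 n.toNat := by
  rw [PySem.Int.toList_toStr, PySem.Int.toChars]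
  simp [not_lt.mpr h]

theorem pv_toList_toStr_neg (n : Int) (h : n < 0) :
    (PySem.Int.toStr n).toList = '-' :: Nat.toDigits 10 n.natAbs := by
  rw [PySem.Int.toList_toStr, PySem.Int.toChars]
  simp [h]

theorem sum_of_double_even_place_number_spec : Claim_equal_sum_of_double_even_place_number := by
  intro number _ hpre
  unfold Spec_sum_of_double_even_place_number
  unfold sum_of_double_even_place_number sum_of_double_even_place_number_alt
  simp only []
  rw [pv_foldA]
  set cs := (PySem.Int.toStr number).toList with hcs
  have hdig : ∀ start : Nat, (0 ≤ number ∨ start = 1) → ∀ c ∈ pvStride2 (cs.drop start), c ∈ pvDigits := by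
    intro start hs c hm
    have hmem : c ∈ cs.drop start := pv_mem_stride2 hm
    by_cases hn : 0 ≤ number
    · have : cs = Nat.toDigits 10 number.toNat := by rw [hcs, pv_toList_toStr_nonneg _ hn]
      exact pv_digits_toDigits _ c (this ▸ (List.mem_of_mem_drop hmem))
    · rcases hs with hn' | rfl
      · exact absurd hn' hn
      · have : cs = '-' :: Nat.toDigits 10 number.natAbs := by
          rw [hcs, pv_toList_toStr_neg _ (by omega)]
        rw [this] at hmem
        exact pv_digits_toDigits _ c (by simpa using hmem)
  by_cases hlen : ((cs.length : Int)) % 2 = 0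
  · simp only [hlen, if_true]
    rw [pv_sel_eq]
    norm_num
    rw [pv_loopB _ _ _ (by norm_num)]
    have h0 : (0 : Int).toNat = 0 := rfl
    rw [h0, List.drop_zero]
    have : pvStride2 cs = pvStride2 (cs.drop 0) := by rw [List.drop_zero]
    have hA : ∀ c ∈ pvStride2 cs, c ∈ pvDigits := by
      intro c hc
      by_cases hn : 0 ≤ number
      · exact hdig 0 (Or.inl hn) c (by simpa using hc)
      · -- negative with even Int-length contradicts Pre_
        exfalso
        unfold Pre_sum_of_double_even_place_number at hpre
        rw [← hcs] at hpre
        rcases hpre with h | h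
        · exact hn h
        · omega
    rw [pv_sumAB hA]
    ring
  · simp only [hlen, if_false]
    rw [pv_sel_eq]
    norm_num
    rw [pv_loopB _ _ _ (by norm_num)]
    have h1 : (1 : Int).toNat = 1 := rfl
    rw [h1]
    have hA : ∀ c ∈ pvStride2 (cs.drop 1), c ∈ pvDigits := hdig 1 (Or.inr rfl)
    rw [← List.drop_one, pv_sumAB hA]
    ring
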